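-- pv_equiv track=rewrite | github.com/sunmuchao/ai_incubation_platform | ai_incubation_platform/Her/src/services/quick_start_service.py | _check_goal_compatibility
-- ===== SOURCE A (Python) =====
-- def _check_goal_compatibility(goal1: str, goal2: str) -> bool:
--     """检查关系目标兼容性"""
--     compatible_groups = [
--         {"serious", "marriage"},
--         {"dating", "casual"}
--     ]
--
--     for group in compatible_groups:
--         if goal1 in group and goal2 in group:
--             return True
--
--     return goal1 == goal2
-- ===== SOURCE B (Python) =====
-- # Map each non-representative goal to its group's canonical representative.
-- _CANON = {"marriage": "serious", "casual": "dating"}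
--
--
-- def _check_goal_compatibility(goal1: str, goal2: str) -> bool:
--     """检查关系目标兼容性"""
--     return _CANON.get(goal1, goal1) == _CANON.get(goal2, goal2)
-- ===== Notes on version B (the rewrite author's own statement) =====
-- stated objective: simpler
-- what changed: Replaces the scan over compatibility groups with membership tests and an equality fallback by normalizing each goal to a canonical group representative and comparing the canonical forms with a single equality.
import Mathlib
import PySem

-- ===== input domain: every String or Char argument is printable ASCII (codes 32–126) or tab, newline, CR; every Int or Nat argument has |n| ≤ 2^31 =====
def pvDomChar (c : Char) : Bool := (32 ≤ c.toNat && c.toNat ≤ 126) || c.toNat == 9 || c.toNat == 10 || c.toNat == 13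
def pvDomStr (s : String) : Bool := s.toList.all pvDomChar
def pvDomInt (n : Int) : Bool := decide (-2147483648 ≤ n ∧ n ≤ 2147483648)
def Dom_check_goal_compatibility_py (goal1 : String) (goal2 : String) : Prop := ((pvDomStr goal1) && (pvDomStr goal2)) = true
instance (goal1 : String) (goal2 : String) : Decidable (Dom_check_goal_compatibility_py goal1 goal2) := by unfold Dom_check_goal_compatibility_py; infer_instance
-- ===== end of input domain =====

-- B normalizes each goal to a canonical group representative and compares the canonical forms (simpler rewrite).


-- ===== PORT A =====
-- compatible_groups: list of sets, scanned in order
def pvGroups : List (PySem.Set String) :=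
  [PySem.Set.ofList ["serious", "marriage"], PySem.Set.ofList ["dating", "casual"]]

-- the 'for group in compatible_groups' loop with early return, then the fallback 'goal1 == goal2'
def pvScanGroups : List (PySem.Set String) → String → String → Bool
  | [], goal1, goal2 => goal1 == goal2
  | g :: rest, goal1, goal2 =>
      if PySem.Set.contains g goal1 && PySem.Set.contains g goal2 then true
      else pvScanGroups rest goal1 goal2

def check_goal_compatibility_py (goal1 : String) (goal2 : String) : Bool :=
  pvScanGroups pvGroups goal1 goal2

-- ===== PORT B =====
-- _CANON: non-representative goal -> canonical representative of its group
def pvCanon : PySem.Dict String String :=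
  PySem.Dict.ofList [("marriage", "serious"), ("casual", "dating")]

def check_goal_compatibility_py_alt (goal1 : String) (goal2 : String) : Bool :=
  PySem.Dict.getD pvCanon goal1 goal1 == PySem.Dict.getD pvCanon goal2 goal2

-- ===== PRECONDITION & SPEC =====
def Spec_check_goal_compatibility_py (goal1 : String) (goal2 : String) (out : Bool) : Prop := out = check_goal_compatibility_py_alt goal1 goal2
instance (goal1 : String) (goal2 : String) (out : Bool) : Decidable (Spec_check_goal_compatibility_py goal1 goal2 out) := by unfold Spec_check_goal_compatibility_py; infer_instance

-- ===== CLAIM (what is proved, stated in full; the proofs are below) =====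
def Claim_equal_check_goal_compatibility_py : Prop := ∀ (goal1 : String) (goal2 : String), Dom_check_goal_compatibility_py goal1 goal2 → Spec_check_goal_compatibility_py goal1 goal2 (check_goal_compatibility_py goal1 goal2)

-- ===== LEMMAS AND PROOFS =====
lemma pv_canon_mk :
    pvCanon = PySem.Dict.mk [("marriage", "serious"), ("casual", "dating")] := by
  decide

lemma pv_getD (s : String) :
    PySem.Dict.getD pvCanon s s =
      if s = "marriage" then "serious" else if s = "casual" then "dating" else s := by
  rw [pv_canon_mk]
  by_cases h1 : s = "marriage" <;> by_cases h2 : s = "casual"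
  · exact absurd h2 (by subst h1; decide)
  · subst h1; decide
  · subst h2; decide
  · have e1 : ("marriage" == s) = false := by
      simp only [beq_eq_false_iff_ne, ne_eq]; exact fun h => h1 h.symm
    have e2 : ("casual" == s) = false := by
      simp only [beq_eq_false_iff_ne, ne_eq]; exact fun h => h2 h.symm
    simp [PySem.Dict.getD, PySem.Dict.get?, List.find?, e1, e2, h1, h2]

theorem pv_main (goal1 goal2 : String) :
    check_goal_compatibility_py goal1 goal2 = check_goal_compatibility_py_alt goal1 goal2 := by
  simp only [check_goal_compatibility_py, check_goal_compatibility_py_alt, pvScanGroups, pvGroups]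
  rw [pv_getD goal1, pv_getD goal2]
  by_cases h1s : goal1 = "serious" <;> by_cases h1m : goal1 = "marriage" <;>
    by_cases h1d : goal1 = "dating" <;> by_cases h1c : goal1 = "casual" <;>
    by_cases h2s : goal2 = "serious" <;> by_cases h2m : goal2 = "marriage" <;>
    by_cases h2d : goal2 = "dating" <;> by_cases h2c : goal2 = "casual" <;>
    simp_all [PySem.Set.contains, PySem.Set.ofList, PySem.Set.add, eq_comm]

-- ===== VERDICT (by name: the statement is the Claim_ definition above) =====
theorem check_goal_compatibility_py_spec : Claim_equal_check_goal_compatibility_py := by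
  intro goal1 goal2 _
  exact pv_main goal1 goal2
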